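-- pv_equiv track=rewrite | github.com/camrdale/advent-of-code | year2015/day19/part1.py | elementize
-- ===== SOURCE A (Python) =====
-- def elementize(molecule: str) -> list[str]:
--     elements: list[str] = []
--
--     i = 0
--     while i < len(molecule):
--         if i + 1 < len(molecule) and molecule[i + 1].islower():
--             elements.append(molecule[i:i+2])
--             i += 2
--         else:
--             elements.append(molecule[i])
--             i += 1
--
--     return elements
-- ===== SOURCE B (Python) =====
-- def elementize(molecule: str) -> list[str]:
--     elements: list[str] = []
--     for c in molecule:
--         if c.islower() and elements and len(elements[-1]) == 1:
--             elements[-1] += c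
--         else:
--             elements.append(c)
--     return elements
-- ===== Notes on version B (the rewrite author's own statement) =====
-- stated objective: alternative
-- what changed: Replaces the index-based lookahead loop (inspect molecule[i+1], advance by 1 or 2) with a per-character lookbehind fold that appends each character and merges a lowercase character into a preceding single-character token.
import Mathlib
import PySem

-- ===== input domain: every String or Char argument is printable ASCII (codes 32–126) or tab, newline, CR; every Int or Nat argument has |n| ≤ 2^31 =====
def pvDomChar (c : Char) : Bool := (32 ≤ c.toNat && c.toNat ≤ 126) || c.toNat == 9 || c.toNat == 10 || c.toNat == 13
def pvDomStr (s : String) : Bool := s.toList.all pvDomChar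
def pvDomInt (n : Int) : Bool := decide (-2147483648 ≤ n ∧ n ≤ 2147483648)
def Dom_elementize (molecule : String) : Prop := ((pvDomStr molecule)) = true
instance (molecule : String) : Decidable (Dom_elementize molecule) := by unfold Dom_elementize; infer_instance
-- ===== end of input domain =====

-- B replaces A's index-based lookahead loop by a per-character lookbehind fold (alternative decomposition, same cost).

-- ===== PORT A =====
-- A's while loop over indices: look AHEAD at the next character, take two characters
-- if the next one is lowercase, else one; the obvious structural recursion on the list.
def elemLoopA : List Char → List String
  | [] => []
  | [c] => [String.ofList [c]]
  | c :: d :: rest =>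
      if PySem.Chars.islower d then String.ofList [c, d] :: elemLoopA rest
      else String.ofList [c] :: elemLoopA (d :: rest)

def elementize (molecule : String) : List String := elemLoopA molecule.toList

-- ===== PORT B =====
-- B's for loop: one step per character, looking BEHIND at the last emitted token.
def stepB (elements : List String) (c : Char) : List String :=
  match elements.getLast? with
  | some t =>
      if PySem.Chars.islower c && (t.toList.length == 1) then
        elements.dropLast ++ [t.push c]
      else elements ++ [String.ofList [c]]
  | none => [String.ofList [c]]

def elementize_alt (molecule : String) : List String := molecule.toList.foldl stepB []

-- ===== PRECONDITION & SPEC =====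
def Spec_elementize (molecule : String) (out : List String) : Prop := out = elementize_alt molecule
instance (molecule : String) (out : List String) : Decidable (Spec_elementize molecule out) := by unfold Spec_elementize; infer_instance

-- ===== CLAIM (what is proved, stated in full; the proofs are below) =====
def Claim_equal_elementize : Prop := ∀ (molecule : String), Dom_elementize molecule → Spec_elementize molecule (elementize molecule)

-- ===== LEMMAS AND PROOFS =====

-- A step of B that cannot merge (lowercase + last token of length 1) just appends.
theorem stepB_nomerge (acc : List String) (c : Char)
    (h : ¬ (PySem.Chars.islower c = true ∧
            ∃ t, acc.getLast? = some t ∧ t.toList.length = 1)) :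
    stepB acc c = acc ++ [String.ofList [c]] := by
  unfold stepB
  cases hl : acc.getLast? with
  | none =>
      rcases acc with _ | ⟨a, as⟩
      · simp
      · simp [List.getLast?] at hl
  | some t =>
      by_cases hlc : PySem.Chars.islower c = true
      · have ht : ¬ t.toList.length = 1 := fun hh => h ⟨hlc, t, hl, hh⟩
        have : ¬ t.length = 1 := by simpa using ht
        simp [hlc, this]
      · simp [hlc]

-- B's fold, started from an accumulator whose first step cannot merge (empty, or
-- last token not of length 1, or first character not lowercase), appends exactly
-- what A's lookahead recursion produces.
theorem foldB_eq (cs : List Char) :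
    ∀ acc : List String,
      (¬ (cs ≠ [] ∧ PySem.Chars.islower (cs.headI) = true ∧
          ∃ t, acc.getLast? = some t ∧ t.toList.length = 1)) →
      cs.foldl stepB acc = acc ++ elemLoopA cs := by
  induction cs using elemLoopA.induct with
  | case1 => intro acc _; simp [elemLoopA]
  | case2 c =>
      intro acc h
      have hstep := stepB_nomerge acc c (fun ⟨h1, h2⟩ => h ⟨by simp, by simpa, h2⟩)
      simp [hstep, elemLoopA]
  | case3 c d rest hlow ih =>
      intro acc h
      have hstep := stepB_nomerge acc c (fun ⟨h1, h2⟩ => h ⟨by simp, by simpa, h2⟩)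
      have hstep2 : stepB (acc ++ [String.ofList [c]]) d
          = acc ++ [String.ofList [c, d]] := by
        unfold stepB
        have hpush : (String.ofList [c]).push d = String.ofList [c, d] := by
          rw [← String.toList_inj]; simp
        simp [hlow, hpush]
      have hrec := ih (acc ++ [String.ofList [c, d]]) (by
        rintro ⟨-, hh, t, ht, hlen⟩
        simp at ht
        subst ht
        simp at hlen)
      rw [List.foldl_cons, hstep, List.foldl_cons, hstep2, hrec]
      simp [elemLoopA, hlow]
  | case4 c d rest hlow ih =>
      intro acc h
      have hstep := stepB_nomerge acc c (fun ⟨h1, h2⟩ => h ⟨by simp, by simpa, h2⟩)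
      have hrec := ih (acc ++ [String.ofList [c]]) (by
        rintro ⟨-, hh, -⟩
        simp at hh
        exact hlow hh)
      rw [List.foldl_cons, hstep, hrec]
      simp [elemLoopA, hlow]

-- ===== VERDICT (by name: the statement is the Claim_ definition above) =====
theorem elementize_spec : Claim_equal_elementize := by
  intro m _
  unfold Spec_elementize elementize elementize_alt
  rw [foldB_eq m.toList []]
  · simp
  · rintro ⟨-, -, t, ht, -⟩
    simp at ht
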